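-- pv_equiv track=rewrite | github.com/3xp10it/sqlmap_my_tamper | mytemper.py | chardoubleencode
-- ===== SOURCE A (Python) =====
-- def chardoubleencode(payload, **kwargs):
--     """
--     Double url-encodes all characters in a given payload (not processing
--     already encoded)
--     Notes:
--         * Useful to bypass some weak web application firewalls that do not
--           double url-decode the request before processing it through their
--           ruleset
--     >>> tamper('SELECT FIELD FROM%20TABLE')
--     '%2553%2545%254C%2545%2543%2554%2520%2546%2549%2545%254C%2544%2520%2546%2552%254F%254D%2520%2554%2541%2542%254C%2545'
--     """
--     retVal = payload
--     if payload:
--         retVal = ""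
--         i = 0
--         while i < len(payload):
--             if payload[i] == '%' and (i < len(payload) - 2) and payload[i + 1:i + 2] in string.hexdigits and payload[i + 2:i + 3] in string.hexdigits:
--                 retVal += '%%25%s' % payload[i + 1:i + 3]
--                 i += 3
--             else:
--                 retVal += '%%25%.2X' % ord(payload[i])
--                 i += 1
--     return retVal
-- ===== SOURCE B (Python) =====
-- import re
--
--
-- def chardoubleencode(payload, **kwargs):
--     retVal = payload
--     if payload:
--         def repl(m):
--             g = m.group()
--             if len(g) == 3:
--                 return '%%25%s' % g[1:3]
--             return '%%25%.2X' % ord(g)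
--         retVal = re.sub('%[0-9a-fA-F]{2}|.', repl, payload, flags=re.DOTALL)
--     return retVal
-- ===== Notes on version B (the rewrite author's own statement) =====
-- stated objective: idiomatic
-- what changed: The hand-rolled while loop with manual index arithmetic, slice tests and repeated string concatenation is replaced by a single regular-expression substitution whose callback handles three-character already-encoded tokens and single characters.
-- crash fix: On any payload containing a percent sign more than two characters before the end, A raises NameError (the module never imports the stdlib string module); B returns the double-encoded payload with already-encoded two-hex-digit sequences passed through. — e.g. on chardoubleencode("%20"): A raises NameError, B returns "%2520"
import Mathlib
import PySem

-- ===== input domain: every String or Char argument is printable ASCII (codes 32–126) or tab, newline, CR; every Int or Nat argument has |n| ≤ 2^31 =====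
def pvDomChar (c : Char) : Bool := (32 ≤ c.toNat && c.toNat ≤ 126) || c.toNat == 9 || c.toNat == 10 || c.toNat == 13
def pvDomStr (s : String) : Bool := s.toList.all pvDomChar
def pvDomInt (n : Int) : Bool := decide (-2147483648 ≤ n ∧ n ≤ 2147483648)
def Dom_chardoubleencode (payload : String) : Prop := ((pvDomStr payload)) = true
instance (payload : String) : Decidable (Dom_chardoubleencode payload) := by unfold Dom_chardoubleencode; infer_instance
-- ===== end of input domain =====

-- B replaces A's manual index loop (with its quadratic repeated concatenation) by a single regex
-- substitution in Python, ported as tokenize-then-replace; A (as shipped) raises NameError on any payload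
-- with a percent sign more than two characters before the end (the stdlib string module is never imported):
-- those inputs are outside Pre_, and B returns the evidently intended double-encoding there (see Raises_).

-- ===== PORT A =====
-- string.hexdigits (the constant A's code reads; at runtime the module never imports it — see Pre_)
def pyHexdigits : List Char := "0123456789abcdefABCDEF".toList

-- '%.2X' for 0 ≤ n < 256 (all inputs are ASCII by Dom): exactly two uppercase hex digits
def hex2X (n : Nat) : List Char :=
  ["0123456789ABCDEF".toList.getD (n / 16) '0', "0123456789ABCDEF".toList.getD (n % 16) '0']

-- the while loop: state (i, retVal)
def cdeLoop (p : List Char) (i : Nat) (retVal : List Char) : List Char :=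
  if i < p.length then
    if (PySem.List.pyGet? p (i : Int) == some '%')
        && decide ((i : Int) < (p.length : Int) - 2)
        && PySem.Chars.isIn (PySem.List.slice p (some ((i : Int) + 1)) (some ((i : Int) + 2))) pyHexdigits
        && PySem.Chars.isIn (PySem.List.slice p (some ((i : Int) + 2)) (some ((i : Int) + 3))) pyHexdigits then
      cdeLoop p (i + 3) (retVal ++ '%' :: '2' :: '5' :: PySem.List.slice p (some ((i : Int) + 1)) (some ((i : Int) + 3)))
    else
      cdeLoop p (i + 1) (retVal ++ '%' :: '2' :: '5' :: hex2X ((PySem.List.pyGetD p (i : Int) ' ').toNat))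
  else retVal
termination_by p.length - i

def chardoubleencode (payload : String) : String :=
  if payload = "" then payload
  else String.ofList (cdeLoop payload.toList 0 [])

-- ===== PORT B =====
-- the regex character class [0-9a-fA-F]
def isHexChar (c : Char) : Bool := "0123456789abcdefABCDEF".toList.contains c

-- leftmost tokenization by the pattern '%[0-9a-fA-F]{2}|.'
def cdeTokens : List Char → List (List Char)
  | [] => []
  | c :: rest =>
      if c = '%' ∧ 2 ≤ rest.length ∧ isHexChar (rest.headD ' ') ∧ isHexChar ((rest.drop 1).headD ' ')
      then ('%' :: rest.take 2) :: cdeTokens (rest.drop 2)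
      else [c] :: cdeTokens rest
termination_by cs => cs.length
decreasing_by all_goals simp

-- the replacement callback
def cdeRepl (tok : List Char) : List Char :=
  if tok.length == 3 then '%' :: '2' :: '5' :: tok.drop 1
  else '%' :: '2' :: '5' :: hex2X ((tok.headD ' ').toNat)

def chardoubleencode_alt (payload : String) : String :=
  if payload = "" then payload
  else String.ofList (((cdeTokens payload.toList).map cdeRepl).flatten)

-- ===== PRECONDITION & SPEC =====
-- Pre_ excludes exactly the payloads on which A raises NameError (the stdlib string module is never
-- imported; its name is only evaluated when a percent sign occurs at a position i < len-2).
def Pre_chardoubleencode (payload : String) : Prop :=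
  '%' ∉ payload.toList.take (payload.toList.length - 2)
instance (payload : String) : Decidable (Pre_chardoubleencode payload) := by
  unfold Pre_chardoubleencode; infer_instance

def pvWitness_chardoubleencode : String := "ab%2"

-- On any payload with a percent sign more than two characters before the end A raises NameError; B returns
-- the double-encoded payload with already-encoded two-hex-digit sequences passed through.
def Raises_chardoubleencode (payload : String) : Prop :=
  '%' ∈ payload.toList.take (payload.toList.length - 2)
instance (payload : String) : Decidable (Raises_chardoubleencode payload) := by
  unfold Raises_chardoubleencode; infer_instance

def pvRaiseWitness_chardoubleencode : String := "%20"
def pvRaiseWitnessOut_chardoubleencode : String := "%2520"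

def Spec_chardoubleencode (payload : String) (out : String) : Prop := out = chardoubleencode_alt payload
instance (payload : String) (out : String) : Decidable (Spec_chardoubleencode payload out) := by
  unfold Spec_chardoubleencode; infer_instance

-- ===== CLAIM (what is proved, stated in full; the proofs are below) =====
def Claim_equal_chardoubleencode : Prop := ∀ (payload : String), Dom_chardoubleencode payload → Pre_chardoubleencode payload → Spec_chardoubleencode payload (chardoubleencode payload)

def Claim_raises_chardoubleencode : Prop := (∀ (payload : String), Dom_chardoubleencode payload → Raises_chardoubleencode payload → ¬ Pre_chardoubleencode payload) ∧ (Dom_chardoubleencode (pvRaiseWitness_chardoubleencode) ∧ Raises_chardoubleencode (pvRaiseWitness_chardoubleencode) ∧ chardoubleencode_alt (pvRaiseWitness_chardoubleencode) = pvRaiseWitnessOut_chardoubleencode)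

-- ===== LEMMAS AND PROOFS =====

theorem isIn_singleton (x : Char) (l : List Char) : PySem.Chars.isIn [x] l = true ↔ x ∈ l := by
  rw [PySem.Chars.isIn_iff_infix]
  constructor
  · intro h; exact h.subset (List.mem_singleton_self x)
  · intro h
    obtain ⟨s, t, rfl⟩ := List.append_of_mem h
    exact ⟨s, t, by simp⟩

theorem isHexChar_iff_mem (c : Char) : isHexChar c = true ↔ c ∈ pyHexdigits := by
  simp [isHexChar, pyHexdigits]

theorem cde_main_bounded (p : List Char) : ∀ (n i : Nat) (acc : List Char), p.length ≤ i + n →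
    cdeLoop p i acc = acc ++ ((cdeTokens (p.drop i)).map cdeRepl).flatten := by
  intro n
  induction n with
  | zero =>
    intro i acc hle
    rw [cdeLoop, if_neg (by omega), List.drop_of_length_le (by omega)]
    simp [cdeTokens]
  | succ n ih =>
    intro i acc hle
    by_cases hi : i < p.length
    · by_cases hc :
        ((PySem.List.pyGet? p (i : Int) == some '%')
          && decide ((i : Int) < (p.length : Int) - 2)
          && PySem.Chars.isIn (PySem.List.slice p (some ((i : Int) + 1)) (some ((i : Int) + 2))) pyHexdigits
          && PySem.Chars.isIn (PySem.List.slice p (some ((i : Int) + 2)) (some ((i : Int) + 3))) pyHexdigits) = true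
      · simp only [Bool.and_eq_true, beq_iff_eq, decide_eq_true_eq] at hc
        obtain ⟨⟨⟨h1, h2⟩, h3⟩, h4⟩ := hc
        have h2' : i + 2 < p.length := by omega
        have hget : p[i] = '%' := by
          rw [PySem.List.pyGet?_natCast, List.getElem?_eq_getElem hi] at h1
          exact Option.some_inj.mp h1
        have c12 : ((i : Int) + 1) = ((i + 1 : Nat) : Int) := by push_cast; ring
        have c2 : ((i : Int) + 2) = ((i + 2 : Nat) : Int) := by push_cast; ring
        have c3 : ((i : Int) + 3) = ((i + 3 : Nat) : Int) := by push_cast; ring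
        have hd1 : p.drop (i+1) = p[i+1] :: p.drop (i+2) := List.drop_eq_getElem_cons (by omega)
        have hd2 : p.drop (i+2) = p[i+2] :: p.drop (i+3) := List.drop_eq_getElem_cons (by omega)
        have hs1 : PySem.List.slice p (some ((i : Int) + 1)) (some ((i : Int) + 2)) = [p[i+1]] := by
          rw [c12, c2, PySem.List.slice_natCast, show i + 2 - (i + 1) = 1 from by omega, hd1]
          rfl
        have hs2 : PySem.List.slice p (some ((i : Int) + 2)) (some ((i : Int) + 3)) = [p[i+2]] := by
          rw [c2, c3, PySem.List.slice_natCast, show i + 3 - (i + 2) = 1 from by omega, hd2]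
          rfl
        have hs13 : PySem.List.slice p (some ((i : Int) + 1)) (some ((i : Int) + 3)) = [p[i+1], p[i+2]] := by
          rw [c12, c3, PySem.List.slice_natCast, show i + 3 - (i + 1) = 2 from by omega, hd1, hd2]
          rfl
        rw [hs1, isIn_singleton] at h3
        rw [hs2, isIn_singleton] at h4
        have hd : p.drop i = p[i] :: p[i+1] :: p[i+2] :: p.drop (i+3) := by
          rw [List.drop_eq_getElem_cons hi, hd1, hd2]
        rw [cdeLoop, if_pos hi]
        rw [if_pos (by
          simp only [Bool.and_eq_true, beq_iff_eq, decide_eq_true_eq]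
          refine ⟨⟨⟨?_, by omega⟩, ?_⟩, ?_⟩
          · rw [PySem.List.pyGet?_natCast, List.getElem?_eq_getElem hi, hget]
          · rw [hs1, isIn_singleton]; exact h3
          · rw [hs2, isIn_singleton]; exact h4)]
        rw [hs13, ih (i+3) _ (by omega), hd, cdeTokens]
        rw [if_pos ⟨hget, by simp; omega, by
            rw [List.headD_cons]; exact (isHexChar_iff_mem _).mpr h3, by
            rw [List.drop_one, List.tail_cons, List.headD_cons]; exact (isHexChar_iff_mem _).mpr h4⟩]
        have htake : (p[i+1] :: p[i+2] :: p.drop (i+3)).take 2 = [p[i+1], p[i+2]] := rfl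
        have hdrop2 : (p[i+1] :: p[i+2] :: p.drop (i+3)).drop 2 = p.drop (i+3) := rfl
        have hrepl : cdeRepl ['%', p[i+1], p[i+2]] = '%' :: '2' :: '5' :: [p[i+1], p[i+2]] := rfl
        rw [htake, hdrop2, List.map_cons, List.flatten_cons, hrepl]
        simp only [List.append_assoc, List.cons_append]
      · rw [cdeLoop, if_pos hi, if_neg hc, ih (i+1) _ (by omega)]
        have hd : p.drop i = p[i] :: p.drop (i+1) := List.drop_eq_getElem_cons hi
        have hTok : ¬ (p[i] = '%' ∧ 2 ≤ (p.drop (i+1)).length ∧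
            isHexChar ((p.drop (i+1)).headD ' ') = true ∧
            isHexChar (((p.drop (i+1)).drop 1).headD ' ') = true) := by
          rintro ⟨e1, e2, e3, e4⟩
          apply hc
          rw [List.length_drop] at e2
          have h2' : i + 2 < p.length := by omega
          have hd1 : p.drop (i+1) = p[i+1] :: p.drop (i+2) := List.drop_eq_getElem_cons (by omega)
          have hd2 : p.drop (i+2) = p[i+2] :: p.drop (i+3) := List.drop_eq_getElem_cons (by omega)
          have c12 : ((i : Int) + 1) = ((i + 1 : Nat) : Int) := by push_cast; ring
          have c2 : ((i : Int) + 2) = ((i + 2 : Nat) : Int) := by push_cast; ring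
          have c3 : ((i : Int) + 3) = ((i + 3 : Nat) : Int) := by push_cast; ring
          rw [hd1, List.headD_cons] at e3
          rw [hd1, List.drop_one, List.tail_cons, hd2, List.headD_cons] at e4
          simp only [Bool.and_eq_true, beq_iff_eq, decide_eq_true_eq]
          refine ⟨⟨⟨?_, by omega⟩, ?_⟩, ?_⟩
          · rw [PySem.List.pyGet?_natCast, List.getElem?_eq_getElem hi, e1]
          · rw [c12, c2, PySem.List.slice_natCast, show i + 2 - (i + 1) = 1 from by omega, hd1,
              show (p[i+1] :: p.drop (i+2)).take 1 = [p[i+1]] from rfl, isIn_singleton]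
            exact (isHexChar_iff_mem _).mp e3
          · rw [c2, c3, PySem.List.slice_natCast, show i + 3 - (i + 2) = 1 from by omega, hd2,
              show (p[i+2] :: p.drop (i+3)).take 1 = [p[i+2]] from rfl, isIn_singleton]
            exact (isHexChar_iff_mem _).mp e4
        have hgd : PySem.List.pyGetD p (i : Int) ' ' = p[i] := by
          rw [PySem.List.pyGetD_natCast]
          exact List.getD_eq_getElem _ _ hi
        rw [hd, cdeTokens, if_neg hTok, hgd]
        have hrepl : cdeRepl [p[i]] = '%' :: '2' :: '5' :: hex2X p[i].toNat := rfl
        rw [List.map_cons, List.flatten_cons, hrepl]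
        simp only [List.append_assoc, List.cons_append]
    · rw [cdeLoop, if_neg hi, List.drop_of_length_le (by omega)]
      simp [cdeTokens]

theorem cde_main (p : List Char) (i : Nat) (acc : List Char) :
    cdeLoop p i acc = acc ++ ((cdeTokens (p.drop i)).map cdeRepl).flatten :=
  cde_main_bounded p p.length i acc (by omega)

-- ===== VERDICT (by name: the statement is the Claim_ definition above) =====
theorem chardoubleencode_spec : Claim_equal_chardoubleencode := by
  intro payload _ _
  unfold Spec_chardoubleencode chardoubleencode chardoubleencode_alt
  split
  · rfl
  · rw [cde_main]; simp

@[simp]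
theorem chardoubleencode_raises : Claim_raises_chardoubleencode := by
  unfold Claim_raises_chardoubleencode
  exact ⟨fun p _ h hp => hp h, ⟨by decide, by decide, by simp [chardoubleencode_alt, pvRaiseWitness_chardoubleencode, pvRaiseWitnessOut_chardoubleencode, cdeTokens, cdeRepl, isHexChar]⟩⟩
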